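-- pv_equiv track=rewrite | github.com/antenore/voynich-toolkit | src/voynich_toolkit/digraph_analysis.py | _tokenize_with_digraph
-- ===== SOURCE A (Python) =====
-- def _tokenize_with_digraph(word, digraph):
--     """Tokenize an EVA word treating a specific digraph as a single unit.
--
--     Returns list of tokens where the digraph is one token.
--     E.g., _tokenize_with_digraph("chedy", "ch") → ["ch", "e", "d", "y"]
--     """
--     tokens = []
--     i = 0
--     dg_len = len(digraph)
--     while i < len(word):
--         if word[i:i + dg_len] == digraph:
--             tokens.append(digraph)
--             i += dg_len
--         else:
--             tokens.append(word[i])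
--             i += 1
--     return tokens
-- ===== SOURCE B (Python) =====
-- def _tokenize_with_digraph(word, digraph):
--     """Tokenize an EVA word treating a specific digraph as a single unit."""
--     parts = word.split(digraph)
--     tokens = list(parts[0])
--     for part in parts[1:]:
--         tokens.append(digraph)
--         tokens.extend(part)
--     return tokens
-- ===== Notes on version B (the rewrite author's own statement) =====
-- stated objective: simpler
-- what changed: Replaces the explicit index-advancing scan over the word with word.split(digraph) (the same greedy non-overlapping matching) followed by a pass that interleaves the digraph token between the character lists of the parts; Pre_ excludes digraph = '', on which A loops forever for any non-empty word (and returns [] only for the empty word) while B's split('') raises ValueError.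
-- outside the precondition, e.g. on _tokenize_with_digraph('', ''): A returns [], B raises ValueError
import Mathlib
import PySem

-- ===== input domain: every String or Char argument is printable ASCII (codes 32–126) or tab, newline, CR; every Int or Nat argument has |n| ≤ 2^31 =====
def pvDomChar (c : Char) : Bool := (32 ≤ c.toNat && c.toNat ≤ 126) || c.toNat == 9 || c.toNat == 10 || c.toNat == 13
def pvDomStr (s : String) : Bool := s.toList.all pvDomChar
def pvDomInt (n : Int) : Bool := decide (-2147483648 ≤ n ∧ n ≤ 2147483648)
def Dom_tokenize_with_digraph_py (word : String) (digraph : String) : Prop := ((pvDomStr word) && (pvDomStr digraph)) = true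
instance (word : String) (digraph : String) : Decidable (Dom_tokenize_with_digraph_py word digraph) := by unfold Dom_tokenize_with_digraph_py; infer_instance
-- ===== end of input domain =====

-- B replaces A's index-advancing scan with split-on-digraph followed by an interleaving pass (objective: simpler).

-- ===== PORT A =====
-- A's while loop, scanning the remaining suffix of the word; 'w.take d.length = d' is
-- Python's 'word[i:i+dg_len] == digraph'.  The extra conjunct 'd ≠ []' is only a
-- termination guard: for digraph = "" the Python loop never terminates (excluded by Pre_).
def tokAGo (d : List Char) : List Char → List String
  | [] => []
  | c :: rest =>
    if h : d ≠ [] ∧ (c :: rest).take d.length = d then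
      String.ofList d :: tokAGo d ((c :: rest).drop d.length)
    else
      String.ofList [c] :: tokAGo d rest
termination_by w => w.length
decreasing_by
  · have hd : d.length ≥ 1 := by
      rcases d with _ | _ <;> simp_all
    have hle : d.length ≤ (c :: rest).length := by
      calc d.length = ((c :: rest).take d.length).length := by rw [h.2]
        _ ≤ (c :: rest).length := (List.take_sublist _ _).length_le
    simp only [List.length_drop, List.length_cons] at hle ⊢
    omega
  · simp

def tokenize_with_digraph_py (word : String) (digraph : String) : List String :=
  tokAGo digraph.toList word.toList

-- ===== PORT B =====
-- Source B: parts = word.split(digraph); tokens = list(parts[0]); for part in parts[1:]: append digraph, extend part.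
def tokenize_with_digraph_py_alt (word : String) (digraph : String) : List String :=
  match PySem.Chars.splitOn word.toList digraph.toList with
  | [] => []  -- unreachable: split never returns an empty list
  | p :: ps =>
      p.map (fun c => String.ofList [c]) ++
        ps.flatMap (fun q => digraph :: q.map (fun c => String.ofList [c]))

-- ===== PRECONDITION & SPEC =====
-- Pre_ excludes digraph = "": there A's while loop never terminates for any non-empty word (it returns [] only
-- for word = ""), while B's word.split("") raises ValueError.
def Pre_tokenize_with_digraph_py (word : String) (digraph : String) : Prop := digraph ≠ ""
instance (word : String) (digraph : String) : Decidable (Pre_tokenize_with_digraph_py word digraph) := by unfold Pre_tokenize_with_digraph_py; infer_instance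

def pvWitness_tokenize_with_digraph_py : String × String := ("chedy", "ch")

def Spec_tokenize_with_digraph_py (word : String) (digraph : String) (out : List String) : Prop := out = tokenize_with_digraph_py_alt word digraph
instance (word : String) (digraph : String) (out : List String) : Decidable (Spec_tokenize_with_digraph_py word digraph out) := by unfold Spec_tokenize_with_digraph_py; infer_instance

-- ===== CLAIM (what is proved, stated in full; the proofs are below) =====
def Claim_equal_tokenize_with_digraph_py : Prop := ∀ (word : String) (digraph : String), Dom_tokenize_with_digraph_py word digraph → Pre_tokenize_with_digraph_py word digraph → Spec_tokenize_with_digraph_py word digraph (tokenize_with_digraph_py word digraph)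

-- ===== LEMMAS AND PROOFS =====

theorem modifyHead_id_fun {α : Type} (l : List α) : l.modifyHead (fun x => x) = l := by
  cases l <;> simp

-- Reference recursion for Python's str.split with a non-empty separator (proof-only).
def splitS (d : List Char) (w : List Char) : List (List Char) :=
  if h : d ≠ [] ∧ d.isPrefixOf w then
    [] :: splitS d (w.drop d.length)
  else
    match w with
    | [] => [[]]
    | c :: rest => (splitS d rest).modifyHead (c :: ·)
termination_by w.length
decreasing_by
  · have hd : d.length ≥ 1 := by rcases d with _ | _ <;> simp_all
    have hle : d.length ≤ w.length := (List.isPrefixOf_iff_prefix.mp h.2).sublist.length_le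
    simp [List.length_drop]
    omega
  · simp

theorem splitS_ne_nil (d : List Char) : ∀ w, splitS d w ≠ [] := by
  intro w
  induction hn : w.length using Nat.strong_induction_on generalizing w with
  | _ n ih =>
  subst hn
  rw [splitS]
  split
  · simp
  · cases w with
    | nil => simp
    | cons c rest =>
      have hne := ih rest.length (by simp) rest rfl
      cases h : splitS d rest
      · exact absurd h hne
      · simp [h]

theorem splitOn_go_eq (d : List Char) (hd : d ≠ []) :
    ∀ fuel w cur acc, w.length < fuel →
      PySem.Chars.splitOn.go d fuel w cur acc =
        acc.reverse ++ (splitS d w).modifyHead (cur.reverse ++ ·) := by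
  intro fuel
  induction fuel with
  | zero => intro w cur acc h; omega
  | succ n ih =>
    intro w cur acc h
    cases w with
    | nil =>
      rw [PySem.Chars.splitOn.go.eq_def, splitS]
      have hc : ¬ (d ≠ [] ∧ d.isPrefixOf ([] : List Char)) := by
        rintro ⟨h1, h2⟩
        exact h1 (List.prefix_nil.mp (List.isPrefixOf_iff_prefix.mp h2))
      simp [hc]
    | cons c rest =>
      rw [PySem.Chars.splitOn.go.eq_def, splitS]
      by_cases hp : d.isPrefixOf (c :: rest)
      · have hlen : d.length ≤ (c :: rest).length :=
          (List.isPrefixOf_iff_prefix.mp hp).sublist.length_le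
        have hd1 : d.length ≥ 1 := by rcases d with _ | _ <;> simp_all
        have hih := ih ((c :: rest).drop d.length) [] ((cur.reverse) :: acc)
          (by simp at h ⊢; omega)
        simp only [hp, if_true, hd, ne_eq, not_false_iff, true_and, hih]
        simp [modifyHead_id_fun]
      · have hih := ih rest (c :: cur) acc (by simp at h ⊢; omega)
        have hcond : ¬ (d ≠ [] ∧ d.isPrefixOf (c :: rest)) := fun h' => hp h'.2
        simp only [hp, if_false, Bool.false_eq_true, dif_neg hcond, hih]
        cases hs : splitS d rest with
        | nil => exact absurd hs (splitS_ne_nil d rest)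
        | cons p ps => simp [hs]

theorem splitOn_eq_splitS (d w : List Char) (hd : d ≠ []) :
    PySem.Chars.splitOn w d = splitS d w := by
  rw [PySem.Chars.splitOn, splitOn_go_eq d hd (w.length + 1) w [] [] (by omega)]
  cases hs : splitS d w with
  | nil => exact absurd hs (splitS_ne_nil d w)
  | cons p ps => simp [hs]

-- B's interleaving pass, expressed over splitS.
def interB (d : List Char) (parts : List (List Char)) : List String :=
  match parts with
  | [] => []
  | p :: ps =>
      p.map (fun c => String.ofList [c]) ++
        ps.flatMap (fun q => String.ofList d :: q.map (fun c => String.ofList [c]))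

theorem take_eq_iff_isPrefixOf (d w : List Char) :
    w.take d.length = d ↔ d.isPrefixOf w := by
  rw [List.isPrefixOf_iff_prefix, List.prefix_iff_eq_take]
  exact eq_comm

theorem tokAGo_eq_interB (d : List Char) (hd : d ≠ []) :
    ∀ w, tokAGo d w = interB d (splitS d w) := by
  intro w
  induction hn : w.length using Nat.strong_induction_on generalizing w with
  | _ n ih =>
  subst hn
  cases w with
  | nil =>
    rw [tokAGo, splitS]
    have hc : ¬ (d ≠ [] ∧ d.isPrefixOf ([] : List Char)) := by
      rintro ⟨h1, h2⟩
      exact h1 (List.prefix_nil.mp (List.isPrefixOf_iff_prefix.mp h2))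
    simp [hc, interB]
  | cons c rest =>
    rw [tokAGo, splitS]
    by_cases hp : d.isPrefixOf (c :: rest)
    · have htake : (c :: rest).take d.length = d := (take_eq_iff_isPrefixOf d _).mpr hp
      have hlen : d.length ≤ (c :: rest).length :=
        (List.isPrefixOf_iff_prefix.mp hp).sublist.length_le
      have hd1 : d.length ≥ 1 := by rcases d with _ | _ <;> simp_all
      have hih := ih ((c :: rest).drop d.length).length
        (by simp [List.length_drop]; omega) _ rfl
      rw [dif_pos (show d ≠ [] ∧ (c :: rest).take d.length = d from ⟨hd, htake⟩),
          dif_pos (show d ≠ [] ∧ d.isPrefixOf (c :: rest) = true from ⟨hd, hp⟩), hih]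
      cases hs : splitS d ((c :: rest).drop d.length) with
      | nil => exact absurd hs (splitS_ne_nil d _)
      | cons p ps => simp [hs, interB]
    · have htake : ¬ (c :: rest).take d.length = d :=
        fun h' => hp ((take_eq_iff_isPrefixOf d _).mp h')
      have hcond : ¬ (d ≠ [] ∧ d.isPrefixOf (c :: rest)) := fun h' => hp h'.2
      have hih := ih rest.length (by simp) rest rfl
      rw [dif_neg (show ¬ (d ≠ [] ∧ (c :: rest).take d.length = d) from fun h' => htake h'.2),
          dif_neg hcond, hih]
      cases hs : splitS d rest with
      | nil => exact absurd hs (splitS_ne_nil d rest)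
      | cons p ps => simp [hs, interB]

-- ===== VERDICT (by name: the statement is the Claim_ definition above) =====
theorem tokenize_with_digraph_py_spec : Claim_equal_tokenize_with_digraph_py := by
  intro word digraph _ hpre
  unfold Spec_tokenize_with_digraph_py tokenize_with_digraph_py tokenize_with_digraph_py_alt
  have hd : digraph.toList ≠ [] := by
    intro h
    exact hpre (String.toList_inj.mp (by simp [h]))
  rw [splitOn_eq_splitS _ _ hd, tokAGo_eq_interB _ hd]
  cases hs : splitS digraph.toList word.toList with
  | nil => exact absurd hs (splitS_ne_nil _ _)
  | cons p ps =>
    simp [interB]
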